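-- pv_equiv track=rewrite | github.com/NobuyukiInoue/LeetCode | Problems/2300_2399/2395_Find_Subarrays_With_Equal_Sum/Project_Python3/Find_Subarrays_With_Equal_Sum.py | findSubarrays2
-- ===== SOURCE A (Python) =====
-- from typing import List, Dict, Tuple
--
-- def findSubarrays2(nums: List[int]) -> bool:
--     # 43ms - 86ms
--     hash_map = {}
--     for i in range(len(nums) - 1):
--         t = nums[i] + nums[i + 1]
--         if t in hash_map.keys():
--             return True
--         hash_map[t] = t
--     return False
-- ===== SOURCE B (Python) =====
-- def findSubarrays2(nums):
--     sums = sorted(a + b for a, b in zip(nums, nums[1:]))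
--     return any(x == y for x, y in zip(sums, sums[1:]))
-- ===== Notes on version B (the rewrite author's own statement) =====
-- stated objective: alternative
-- what changed: Replaces A's hash-map duplicate detection with early return by a sort-based algorithm: build the adjacent-pair sums via zip, sort them, and report whether any two neighbours in the sorted list are equal.
import Mathlib
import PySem

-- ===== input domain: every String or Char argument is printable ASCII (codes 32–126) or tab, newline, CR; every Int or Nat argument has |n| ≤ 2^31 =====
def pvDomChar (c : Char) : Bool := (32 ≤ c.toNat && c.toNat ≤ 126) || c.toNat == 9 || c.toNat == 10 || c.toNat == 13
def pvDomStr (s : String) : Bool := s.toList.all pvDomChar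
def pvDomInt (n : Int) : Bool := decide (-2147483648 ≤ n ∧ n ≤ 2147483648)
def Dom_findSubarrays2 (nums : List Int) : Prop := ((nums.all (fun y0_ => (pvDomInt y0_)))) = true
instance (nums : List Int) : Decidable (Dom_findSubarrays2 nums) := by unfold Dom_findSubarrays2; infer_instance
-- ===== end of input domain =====

-- B replaces A's incremental hash map with early return by a sort-based algorithm: sort the adjacent-pair sums and scan for equal neighbours; alternative (different algorithm, similar size).


-- ===== PORT A =====
-- the loop 'for i in range(len(nums)-1): …' with early return; nums[i] is exact via
-- pyGetD since every i drawn from the range is in bounds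
def findSubarrays2Go (nums : List Int) : List Int → PySem.Dict Int Int → Bool
  | [], _ => false
  | i :: rest, hm =>
    let t := PySem.List.pyGetD nums i 0 + PySem.List.pyGetD nums (i + 1) 0
    if hm.contains t then true else findSubarrays2Go nums rest (hm.insert t t)

def findSubarrays2 (nums : List Int) : Bool :=
  findSubarrays2Go nums (PySem.List.pyRange 0 ((nums.length : Int) - 1) 1) PySem.Dict.empty

-- ===== PORT B =====
-- sums = sorted(a + b for a, b in zip(nums, nums[1:])); any(x == y for x, y in zip(sums, sums[1:]))
def findSubarrays2_alt (nums : List Int) : Bool :=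
  let sums := PySem.List.sorted ((nums.zip (PySem.List.slice nums (some 1) none)).map (fun p => p.1 + p.2)) (fun x => x) false
  (sums.zip (PySem.List.slice sums (some 1) none)).any (fun p => p.1 == p.2)

-- ===== PRECONDITION & SPEC =====
def Spec_findSubarrays2 (nums : List Int) (out : Bool) : Prop := out = findSubarrays2_alt nums
instance (nums : List Int) (out : Bool) : Decidable (Spec_findSubarrays2 nums out) := by unfold Spec_findSubarrays2; infer_instance

-- ===== CLAIM (what is proved, stated in full; the proofs are below) =====
def Claim_equal_findSubarrays2 : Prop := ∀ (nums : List Int), Dom_findSubarrays2 nums → Spec_findSubarrays2 nums (findSubarrays2 nums)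

-- ===== LEMMAS AND PROOFS =====

-- A's loop, abstracted to the list of pair sums it inspects
def dupScan : List Int → PySem.Dict Int Int → Bool
  | [], _ => false
  | t :: rest, hm =>
    if hm.contains t then true else dupScan rest (hm.insert t t)

theorem go_eq_dupScan (nums : List Int) (idxs : List Int) (hm : PySem.Dict Int Int) :
    findSubarrays2Go nums idxs hm =
      dupScan (idxs.map (fun i => PySem.List.pyGetD nums i 0 + PySem.List.pyGetD nums (i + 1) 0)) hm := by
  induction idxs generalizing hm with
  | nil => rfl
  | cons i rest ih =>
    simp only [findSubarrays2Go, dupScan, List.map]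
    split <;> simp [ih]

theorem dupScan_eq (l : List Int) (hm : PySem.Dict Int Int) :
    dupScan l hm = (l.any (fun t => hm.contains t) || !decide l.Nodup) := by
  induction l generalizing hm with
  | nil => simp [dupScan]
  | cons t rest ih =>
    simp only [dupScan]
    by_cases h : hm.contains t = true
    · simp [h]
    · rw [if_neg h, ih]
      rw [Bool.eq_iff_iff]
      simp only [Bool.or_eq_true, List.any_eq_true, List.any_cons,
        PySem.Dict.contains_insert, beq_iff_eq, Bool.not_eq_eq_eq_not, Bool.not_true,
        decide_eq_false_iff_not, List.nodup_cons, h, Bool.false_eq_true, false_or]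
      constructor
      · rintro (⟨x, hx, hx2 | hx2⟩ | hnd)
        · exact Or.inr (fun ⟨hn, _⟩ => hn (hx2 ▸ hx))
        · exact Or.inl ⟨x, hx, hx2⟩
        · exact Or.inr (fun ⟨_, hn⟩ => hnd hn)
      · rintro (⟨x, hx, hx2⟩ | hnd)
        · exact Or.inl ⟨x, hx, Or.inr hx2⟩
        · by_cases hmr : t ∈ rest
          · exact Or.inl ⟨t, hmr, Or.inl rfl⟩
          · exact Or.inr (fun hnr => hnd ⟨hmr, hnr⟩)

-- A's pair-sum list (over pyRange indices) is B's pair-sum list (over zip with the tail)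
theorem pairSums_eq (nums : List Int) :
    (PySem.List.pyRange 0 ((nums.length : Int) - 1) 1).map
      (fun i => PySem.List.pyGetD nums i 0 + PySem.List.pyGetD nums (i + 1) 0)
    = (nums.zip nums.tail).map (fun p => p.1 + p.2) := by
  apply List.ext_getElem
  · simp only [List.length_map, PySem.List.length_pyRange_one, List.length_zip,
      List.length_tail]
    omega
  · intro k h1 h2
    have hk : k < nums.length - 1 := by
      simpa [PySem.List.length_pyRange_one] using h1
    simp only [List.getElem_map, List.getElem_zip, PySem.List.getElem_pyRange_one,
      zero_add]
    have hcast : ((k : Int) + 1) = ((k + 1 : Nat) : Int) := by push_cast; ring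
    rw [hcast, PySem.List.pyGetD_natCast, PySem.List.pyGetD_natCast,
      List.getD_eq_getElem _ _ (by omega), List.getD_eq_getElem _ _ (by omega),
      List.getElem_tail]

-- adjacent-equal scan on a ≤-sorted list detects exactly the duplicates
theorem adjScan_sorted (l : List Int) (hp : l.Pairwise (· ≤ ·)) :
    (l.zip l.tail).any (fun p => p.1 == p.2) = !decide l.Nodup := by
  induction l with
  | nil => simp
  | cons a rest ih =>
    cases rest with
    | nil => simp
    | cons b rest' =>
      have hp' := List.Pairwise.sublist (List.sublist_cons_self a _) hp
      by_cases hab : a = b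
      · subst hab
        simp [List.zip, List.nodup_cons]
      · have hab' : a < b := lt_of_le_of_ne (List.rel_of_pairwise_cons hp (by simp)) hab
        have hnotin : a ∉ b :: rest' := by
          intro hmem
          rcases List.mem_cons.mp hmem with rfl | hmem'
          · exact absurd rfl hab
          · have : b ≤ a := List.rel_of_pairwise_cons hp' hmem'
            omega
        have hthis := ih hp'
        simp only [List.zip, List.tail_cons] at hthis
        simp only [List.zip, List.tail_cons, List.zipWith_cons_cons, List.any_cons]
        rw [hthis, Bool.eq_iff_iff]
        simp [hab, hnotin, List.nodup_cons]

-- ===== VERDICT (by name: the statement is the Claim_ definition above) =====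
theorem findSubarrays2_spec : Claim_equal_findSubarrays2 := by
  intro nums _
  unfold Spec_findSubarrays2 findSubarrays2
  simp only [findSubarrays2_alt, PySem.List.slice_from_one]
  rw [go_eq_dupScan, dupScan_eq, pairSums_eq]
  have hsorted := PySem.List.sorted_pairwise
    ((nums.zip nums.tail).map (fun p => p.1 + p.2)) (fun x => x)
  rw [adjScan_sorted _ hsorted]
  have hperm := PySem.List.sorted_perm
    ((nums.zip nums.tail).map (fun p => p.1 + p.2)) (fun x : Int => x) false
  have hnd : (PySem.List.sorted ((nums.zip nums.tail).map (fun p => p.1 + p.2)) (fun x : Int => x) false).Nodup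
      ↔ ((nums.zip nums.tail).map (fun p => p.1 + p.2)).Nodup := hperm.nodup_iff
  have hempty : ∀ t : Int, PySem.Dict.contains (PySem.Dict.empty : PySem.Dict Int Int) t = false := by
    simp [PySem.Dict.contains_empty]
  simp only [hempty] at *
  simp [hnd]
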